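-- pv_equiv track=rewrite | github.com/Aman140404/python23 | lab5/reverse.py | revsum
-- ===== SOURCE A (Python) =====
-- def revsum(a):
--     rev = 0
--     sumnum = 0
--     while (a > 0):
--         udig = a % 10
--         sumnum = sumnum+udig
--         rev = rev*10+udig
--         a = a//10
--     return ("reverse of the number is ", rev, "\nthe sum of the digits of the number is ", sumnum)
-- ===== SOURCE B (Python) =====
-- def revsum(a):
--     if a > 0:
--         ds = [ord(c) - 48 for c in str(a)]
--         rev = sum(d * 10 ** p for p, d in enumerate(ds))
--         sumnum = sum(ds)
--     else:
--         rev = 0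
--         sumnum = 0
--     return ("reverse of the number is ", rev, "\nthe sum of the digits of the number is ", sumnum)
-- ===== Notes on version B (the rewrite author's own statement) =====
-- stated objective: idiomatic
-- what changed: Replaces the destructive while-loop with its rev/sumnum accumulators by a single pass over the decimal string of a: digit values come from the characters, the digit sum is sum(ds), and the reversal is the closed form sum of each digit times the base raised to its string position (positional weights via enumerate instead of a Horner accumulator).
import Mathlib
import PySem

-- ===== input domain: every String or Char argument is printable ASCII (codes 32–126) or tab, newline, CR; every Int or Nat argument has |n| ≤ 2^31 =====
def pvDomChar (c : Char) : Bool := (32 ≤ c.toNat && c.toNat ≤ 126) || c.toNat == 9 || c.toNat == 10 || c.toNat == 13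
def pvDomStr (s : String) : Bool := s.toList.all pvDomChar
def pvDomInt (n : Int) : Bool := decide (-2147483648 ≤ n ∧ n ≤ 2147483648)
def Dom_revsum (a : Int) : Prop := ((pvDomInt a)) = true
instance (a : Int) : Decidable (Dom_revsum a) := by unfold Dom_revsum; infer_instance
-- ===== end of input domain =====

-- B recomputes the same tuple from the decimal string of a (digit list, sum, and
-- positional-weight closed form for the reversal) instead of A's while-loop; objective: idiomatic.

-- ===== PORT A =====
-- the while-loop of A, state (a, rev, sumnum)
def revsumLoop (a rev sumnum : Int) : Int × Int :=
  if _h : a > 0 then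
    let udig := PySem.Int.mod a 10
    revsumLoop (PySem.Int.floordiv a 10) (rev * 10 + udig) (sumnum + udig)
  else (rev, sumnum)
termination_by a.toNat
decreasing_by
  simp only [PySem.Int.floordiv]
  have : a.fdiv 10 = a / 10 := by rw [Int.fdiv_eq_ediv]; norm_num
  omega

def revsum (a : Int) : String × Int × String × Int :=
  let p := revsumLoop a 0 0
  ("reverse of the number is ", p.1, "\nthe sum of the digits of the number is ", p.2)

-- ===== PORT B =====
def revsum_alt (a : Int) : String × Int × String × Int :=
  if a > 0 then
    -- ds = [ord(c) - 48 for c in str(a)]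
    let ds := (PySem.Int.toChars a).map (fun c => (c.toNat : Int) - 48)
    -- rev = sum(d * 10 ** p for p, d in enumerate(ds));  p ≥ 0 always, so 10 ** p is 10 ^ p.toNat
    let rev := ((PySem.List.enumerate ds 0).map (fun pd => pd.2 * 10 ^ pd.1.toNat)).sum
    let sumnum := ds.sum
    ("reverse of the number is ", rev, "\nthe sum of the digits of the number is ", sumnum)
  else
    ("reverse of the number is ", 0, "\nthe sum of the digits of the number is ", 0)

-- ===== PRECONDITION & SPEC =====
def Spec_revsum (a : Int) (out : String × Int × String × Int) : Prop := out = revsum_alt a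
instance (a : Int) (out : String × Int × String × Int) : Decidable (Spec_revsum a out) := by unfold Spec_revsum; infer_instance

-- ===== CLAIM (what is proved, stated in full; the proofs are below) =====
def Claim_equal_revsum : Prop := ∀ (a : Int), Dom_revsum a → Spec_revsum a (revsum a)

-- ===== LEMMAS AND PROOFS =====

-- the digits as integers
def pvZ (L : List Nat) : List Int := L.map (fun d => Int.ofNat d)

theorem pvZ_nil : pvZ [] = [] := rfl
theorem pvZ_cons (d : Nat) (L : List Nat) : pvZ (d :: L) = (d : Int) :: pvZ L := by
  simp [pvZ]
theorem pvZ_reverse (L : List Nat) : pvZ L.reverse = (pvZ L).reverse := by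
  unfold pvZ
  exact List.map_reverse

-- little-endian value of a digit list
def pvVal : List Int → Int
  | [] => 0
  | d :: M => d + 10 * pvVal M

theorem pvVal_append_singleton (M : List Int) (d : Int) :
    pvVal (M ++ [d]) = pvVal M + d * 10 ^ M.length := by
  induction M with
  | nil => simp [pvVal]
  | cons x M ih => simp [pvVal, ih, pow_succ]; ring

-- A's Horner loop in terms of the little-endian digits of a
theorem revsumLoop_char (n : Nat) : ∀ (a rev sumnum : Int), a.toNat = n →
    revsumLoop a rev sumnum =
      ((pvZ (Nat.digits 10 a.toNat)).foldl (fun r d => r * 10 + d) rev,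
       sumnum + (pvZ (Nat.digits 10 a.toNat)).sum) := by
  induction n using Nat.strong_induction_on with
  | _ n ih =>
    intro a rev sumnum hn
    rw [revsumLoop]
    by_cases h : a > 0
    · simp only [h, dif_pos]
      have ha0 : 0 < a.toNat := by omega
      have hmod : PySem.Int.mod a 10 = ((a.toNat % 10 : Nat) : Int) := by
        simp only [PySem.Int.mod]
        have : a.fmod 10 = a % 10 := by rw [Int.fmod_eq_emod]; norm_num
        omega
      have hdiv : PySem.Int.floordiv a 10 = ((a.toNat / 10 : Nat) : Int) := by
        simp only [PySem.Int.floordiv]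
        have : a.fdiv 10 = a / 10 := by rw [Int.fdiv_eq_ediv]; norm_num
        omega
      have hlt : a.toNat / 10 < n := by omega
      rw [Nat.digits_def' (by norm_num) ha0]
      rw [hmod, hdiv, ih _ hlt _ _ _ (by omega), pvZ_cons]
      simp only [Int.toNat_natCast, List.foldl_cons, List.sum_cons, Prod.mk.injEq]
      exact ⟨trivial, by ring⟩
    · rw [dif_neg h]
      have : a.toNat = 0 := by omega
      simp [this, pvZ_nil]

-- Nat.toDigitsCore produces the big-endian digit characters
theorem toDigitsCore_char (f : Nat) : ∀ (n : Nat) (acc : List Char), 0 < n → n < 10 ^ f →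
    Nat.toDigitsCore 10 f n acc = ((Nat.digits 10 n).map Nat.digitChar).reverse ++ acc := by
  induction f with
  | zero => intro n acc h1 h2; omega
  | succ f ih =>
    intro n acc h1 h2
    rw [Nat.toDigitsCore]
    rw [Nat.digits_def' (by norm_num) h1]
    by_cases h : n / 10 = 0
    · have : n % 10 = n := by omega
      simp [h, this]
    · rw [if_neg h, ih (n / 10) _ (by omega) (by
        have : n / 10 < 10 ^ f := Nat.div_lt_of_lt_mul (by rw [← pow_succ']; omega)
        exact this)]
      rw [Nat.digits_def' (by norm_num) (by omega)]
      simp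

theorem toChars_pos (a : Int) (h : a > 0) :
    PySem.Int.toChars a = ((Nat.digits 10 a.toNat).map Nat.digitChar).reverse := by
  simp only [PySem.Int.toChars, if_neg (by omega : ¬ a < 0)]
  rw [Nat.toDigits, toDigitsCore_char _ _ _ (by omega)
    (lt_of_lt_of_le (Nat.lt_pow_self (by norm_num)) (Nat.pow_le_pow_right (by norm_num) (by omega)))]
  simp

theorem digitChar_val (d : Nat) (h : d < 10) : ((Nat.digitChar d).toNat : Int) - 48 = (d : Int) := by
  interval_cases d <;> decide

-- B's enumerate sum is the little-endian value, shifted by the start index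
theorem enum_sum (M : List Int) : ∀ (k : Nat),
    ((PySem.List.enumerate M (k : Int)).map (fun pd => pd.2 * 10 ^ pd.1.toNat)).sum
      = 10 ^ k * pvVal M := by
  induction M with
  | nil => intro k; simp [PySem.List.enumerate_nil, pvVal]
  | cons d M ih =>
    intro k
    rw [PySem.List.enumerate_cons]
    have : ((k : Int) + 1) = ((k + 1 : Nat) : Int) := by push_cast; ring
    rw [List.map_cons, List.sum_cons, this, ih (k + 1)]
    simp only [Int.toNat_natCast, pvVal, pow_succ]
    ring

-- Horner fold equals value of the reversed list
theorem foldl_horner (M : List Int) : ∀ (r : Int),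
    M.foldl (fun r d => r * 10 + d) r = r * 10 ^ M.length + pvVal M.reverse := by
  induction M with
  | nil => intro r; simp [pvVal]
  | cons d M ih =>
    intro r
    rw [List.foldl_cons, ih]
    rw [List.reverse_cons, pvVal_append_singleton]
    simp only [List.length_cons, List.length_reverse, pow_succ]
    ring

-- ===== VERDICT (by name: the statement is the Claim_ definition above) =====
theorem revsum_spec : Claim_equal_revsum := by
  intro a _
  unfold Spec_revsum revsum revsum_alt
  by_cases h : a > 0
  · simp only [if_pos h]
    rw [revsumLoop_char a.toNat a 0 0 rfl]
    have hds : (PySem.Int.toChars a).map (fun c => (c.toNat : Int) - 48)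
        = (pvZ (Nat.digits 10 a.toNat)).reverse := by
      rw [toChars_pos a h, ← List.map_reverse, List.map_map, ← pvZ_reverse]
      unfold pvZ
      apply List.map_congr_left
      intro d hd
      have : d < 10 := Nat.digits_lt_base (by norm_num) (List.mem_reverse.mp hd)
      simpa using digitChar_val d this
    simp only [hds]
    have h0 : ((0 : Int)) = ((0 : Nat) : Int) := rfl
    simp only [Prod.mk.injEq]
    refine ⟨trivial, ?_, trivial, ?_⟩
    · rw [h0, enum_sum, foldl_horner]
      simp
    · rw [List.sum_reverse]
      simp
  · rw [if_neg h]
    rw [revsumLoop, dif_neg h]
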